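-- pv_equiv track=rewrite | github.com/davidpendergast/watermark-remover | wm_remover.py | points_in_circle
-- ===== SOURCE A (Python) =====
-- def points_in_circle(center, radius, x_bounds, y_bounds):
--     x1 = max(x_bounds[0], center[0] - radius)
--     x2 = min(x_bounds[1], center[0] + radius)
--     y1 = max(y_bounds[0], center[1] - radius)
--     y2 = min(y_bounds[1], center[1] + radius)
--     for x in range(x1, x2):
--         for y in range(y1, y2):
--             dx = (x - center[0])
--             dy = (y - center[1])
--             dist2 = dx*dx + dy*dy
--             if (dist2 <= radius*radius):
--                 yield (x, y)
-- ===== SOURCE B (Python) =====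
-- def points_in_circle(center, radius, x_bounds, y_bounds):
--     x1 = max(x_bounds[0], center[0] - radius)
--     x2 = min(x_bounds[1], center[0] + radius)
--     y1 = max(y_bounds[0], center[1] - radius)
--     y2 = min(y_bounds[1], center[1] + radius)
--     rr = radius * radius
--     for x in range(x1, x2):
--         dx = x - center[0]
--         m = rr - dx * dx
--         # binary search for the largest lo with lo*lo <= m:
--         # the exact integer half-height of the circle at column x
--         lo, hi = 0, m + 1
--         while lo + 1 < hi:
--             mid = (lo + hi) // 2
--             if mid * mid <= m:
--                 lo = mid
--             else:
--                 hi = mid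
--         for y in range(max(y1, center[1] - lo), min(y2 - 1, center[1] + lo) + 1):
--             yield (x, y)
-- ===== Notes on version B (the rewrite author's own statement) =====
-- stated objective: alternative
-- what changed: Per column x, B computes the exact integer half-height k of the circle (largest k with k*k <= r*r-dx*dx, by binary search) and yields the contiguous y-run directly, instead of testing the squared distance of every cell in the clipped bounding box.
import Mathlib
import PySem

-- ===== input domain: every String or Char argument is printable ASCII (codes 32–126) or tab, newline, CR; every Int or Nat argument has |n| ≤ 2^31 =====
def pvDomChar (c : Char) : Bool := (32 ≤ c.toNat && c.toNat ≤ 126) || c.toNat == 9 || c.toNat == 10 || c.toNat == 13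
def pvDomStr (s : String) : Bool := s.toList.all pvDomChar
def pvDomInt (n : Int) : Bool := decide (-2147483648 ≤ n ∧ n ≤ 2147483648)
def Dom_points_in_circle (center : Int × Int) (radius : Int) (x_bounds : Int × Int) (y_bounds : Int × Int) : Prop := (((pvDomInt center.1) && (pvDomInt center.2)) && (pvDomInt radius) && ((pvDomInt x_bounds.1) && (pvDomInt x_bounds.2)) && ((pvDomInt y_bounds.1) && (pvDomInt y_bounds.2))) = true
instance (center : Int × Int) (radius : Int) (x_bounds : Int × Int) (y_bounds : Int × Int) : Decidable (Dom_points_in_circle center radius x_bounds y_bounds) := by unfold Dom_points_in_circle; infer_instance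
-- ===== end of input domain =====

-- B replaces the per-cell distance test with a per-column exact integer half-height k
-- (largest k with k*k ≤ r²-dx², found by binary search) and emits the contiguous y-run directly.


-- ===== PORT A =====
def points_in_circle (center : Int × Int) (radius : Int) (x_bounds : Int × Int) (y_bounds : Int × Int) : List (Int × Int) :=
  let x1 := max x_bounds.1 (center.1 - radius)
  let x2 := min x_bounds.2 (center.1 + radius)
  let y1 := max y_bounds.1 (center.2 - radius)
  let y2 := min y_bounds.2 (center.2 + radius)
  (PySem.List.pyRange x1 x2 1).foldl (fun acc x =>
    (PySem.List.pyRange y1 y2 1).foldl (fun acc2 y =>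
      let dx := x - center.1
      let dy := y - center.2
      let dist2 := dx*dx + dy*dy
      if dist2 ≤ radius*radius then acc2 ++ [(x, y)] else acc2) acc) []

-- ===== PORT B =====
-- '2*(n//2) ≤ n < 2*(n//2)+2' for Python floor division
theorem pvFloordiv2_bounds (n : Int) :
    2 * PySem.Int.floordiv n 2 ≤ n ∧ n < 2 * PySem.Int.floordiv n 2 + 2 := by
  have h1 := Int.mul_fdiv_add_fmod n 2
  have h2 : 0 ≤ n.fmod 2 := Int.fmod_nonneg_of_pos n (by norm_num)
  have h3 : n.fmod 2 < 2 := Int.fmod_lt_of_pos n (by norm_num)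
  simp only [PySem.Int.floordiv]
  omega

-- the 'while lo + 1 < hi: mid = (lo+hi)//2; …' binary-search loop of Source B
def pvIsqrtLoop (m lo hi : Int) : Int :=
  if lo + 1 < hi then
    let mid := PySem.Int.floordiv (lo + hi) 2
    if mid * mid ≤ m then pvIsqrtLoop m mid hi else pvIsqrtLoop m lo mid
  else lo
termination_by (hi - lo).toNat
decreasing_by
  · have h := pvFloordiv2_bounds (lo + hi); omega
  · have h := pvFloordiv2_bounds (lo + hi); omega

def points_in_circle_alt (center : Int × Int) (radius : Int) (x_bounds : Int × Int) (y_bounds : Int × Int) : List (Int × Int) :=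
  let x1 := max x_bounds.1 (center.1 - radius)
  let x2 := min x_bounds.2 (center.1 + radius)
  let y1 := max y_bounds.1 (center.2 - radius)
  let y2 := min y_bounds.2 (center.2 + radius)
  let rr := radius * radius
  (PySem.List.pyRange x1 x2 1).foldl (fun acc x =>
    let dx := x - center.1
    let m := rr - dx*dx
    let k := pvIsqrtLoop m 0 (m + 1)
    acc ++ (PySem.List.pyRange (max y1 (center.2 - k)) (min (y2 - 1) (center.2 + k) + 1) 1).map (fun y => (x, y))) []

-- ===== PRECONDITION & SPEC =====
def Spec_points_in_circle (center : Int × Int) (radius : Int) (x_bounds : Int × Int) (y_bounds : Int × Int) (out : List (Int × Int)) : Prop := out = points_in_circle_alt center radius x_bounds y_bounds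
instance (center : Int × Int) (radius : Int) (x_bounds : Int × Int) (y_bounds : Int × Int) (out : List (Int × Int)) : Decidable (Spec_points_in_circle center radius x_bounds y_bounds out) := by unfold Spec_points_in_circle; infer_instance

-- ===== CLAIM (what is proved, stated in full; the proofs are below) =====
def Claim_equal_points_in_circle : Prop := ∀ (center : Int × Int) (radius : Int) (x_bounds : Int × Int) (y_bounds : Int × Int), Dom_points_in_circle center radius x_bounds y_bounds → Spec_points_in_circle center radius x_bounds y_bounds (points_in_circle center radius x_bounds y_bounds)

-- ===== LEMMAS AND PROOFS =====

-- the binary search returns the greatest r with r*r ≤ m, given the bracketing invariant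
theorem pvIsqrtLoop_spec (m lo hi : Int) :
    0 ≤ lo → lo*lo ≤ m → m < hi*hi → lo < hi →
    0 ≤ pvIsqrtLoop m lo hi ∧ (pvIsqrtLoop m lo hi)*(pvIsqrtLoop m lo hi) ≤ m ∧
      m < (pvIsqrtLoop m lo hi + 1)*(pvIsqrtLoop m lo hi + 1) := by
  fun_induction pvIsqrtLoop m lo hi with
  | case1 lo hi hlt mid hmid ih =>
      intro h0 h1 h2 h3
      have hb := pvFloordiv2_bounds (lo + hi)
      exact ih (by omega) hmid h2 (by omega)
  | case2 lo hi hlt mid hmid ih =>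
      intro h0 h1 h2 h3
      have hb := pvFloordiv2_bounds (lo + hi)
      exact ih h0 h1 (by simpa using hmid) (by omega)
  | case3 lo hi hlt =>
      intro h0 h1 h2 h3
      have hhi : hi = lo + 1 := by omega
      exact ⟨h0, h1, hhi ▸ h2⟩

-- dy*dy ≤ m iff -k ≤ dy ≤ k, for k the integer square root of m
theorem sq_le_iff_abs_le (m k dy : Int) (hk : 0 ≤ k) (h1 : k*k ≤ m) (h2 : m < (k+1)*(k+1)) :
    dy*dy ≤ m ↔ (-k ≤ dy ∧ dy ≤ k) := by
  constructor
  · intro h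
    constructor
    · by_contra hlt
      have hdy : dy ≤ -k - 1 := by omega
      nlinarith [mul_self_nonneg (dy + k + 1)]
    · by_contra hlt
      have hdy : k + 1 ≤ dy := by omega
      nlinarith [mul_self_nonneg (dy - k - 1)]
  · rintro ⟨ha, hb⟩
    nlinarith [mul_nonneg (by omega : (0:Int) ≤ k - dy) (by omega : (0:Int) ≤ k + dy)]

-- filtering a unit-step range by an interval yields the intersected range
theorem filter_pyRange_interval (a b lo hi : Int) :
    (PySem.List.pyRange a b 1).filter (fun y => decide (lo ≤ y ∧ y ≤ hi)) =
      PySem.List.pyRange (max a lo) (min b (hi+1)) 1 := by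
  have hmem : ∀ y : Int, y ∈ (PySem.List.pyRange a b 1).filter (fun y => decide (lo ≤ y ∧ y ≤ hi)) ↔
      y ∈ PySem.List.pyRange (max a lo) (min b (hi+1)) 1 := by
    intro y
    simp [List.mem_filter, PySem.List.mem_pyRange_one]
    omega
  have hnd1 : ((PySem.List.pyRange a b 1).filter (fun y => decide (lo ≤ y ∧ y ≤ hi))).Nodup :=
    (PySem.List.nodup_pyRange_one a b).filter _
  have hnd2 : (PySem.List.pyRange (max a lo) (min b (hi+1)) 1).Nodup :=
    PySem.List.nodup_pyRange_one _ _
  have hperm : List.Perm ((PySem.List.pyRange a b 1).filter (fun y => decide (lo ≤ y ∧ y ≤ hi)))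
      (PySem.List.pyRange (max a lo) (min b (hi+1)) 1) :=
    (List.perm_ext_iff_of_nodup hnd1 hnd2).2 hmem
  have hs1 : ((PySem.List.pyRange a b 1).filter (fun y => decide (lo ≤ y ∧ y ≤ hi))).Pairwise (· < ·) :=
    (PySem.List.pairwise_lt_pyRange_one a b).filter _
  have hs2 : (PySem.List.pyRange (max a lo) (min b (hi+1)) 1).Pairwise (· < ·) :=
    PySem.List.pairwise_lt_pyRange_one _ _
  exact hperm.eq_of_pairwise (fun x y _ _ h h' => absurd h' (lt_asymm h)) hs1 hs2

-- the two column bodies agree for every x of the outer range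
theorem column_eq (c1 c2 radius y1 y2 x : Int)
    (hdx : (x - c1)*(x - c1) ≤ radius*radius) :
    ((PySem.List.pyRange y1 y2 1).filter
        (fun y => decide ((x - c1)*(x - c1) + (y - c2)*(y - c2) ≤ radius*radius))).map (fun y => (x, y)) =
      (PySem.List.pyRange (max y1 (c2 - pvIsqrtLoop (radius*radius - (x - c1)*(x - c1)) 0 (radius*radius - (x - c1)*(x - c1) + 1)))
        (min (y2 - 1) (c2 + pvIsqrtLoop (radius*radius - (x - c1)*(x - c1)) 0 (radius*radius - (x - c1)*(x - c1) + 1)) + 1) 1).map (fun y => (x, y)) := by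
  set m : Int := radius*radius - (x - c1)*(x - c1) with hm
  have hm0 : 0 ≤ m := by omega
  obtain ⟨hk0, hk1, hk2⟩ := pvIsqrtLoop_spec m 0 (m + 1) le_rfl (by simpa using hm0)
    (by nlinarith) (by omega)
  set k : Int := pvIsqrtLoop m 0 (m + 1)
  have hfc : (PySem.List.pyRange y1 y2 1).filter
      (fun y => decide ((x - c1)*(x - c1) + (y - c2)*(y - c2) ≤ radius*radius)) =
      (PySem.List.pyRange y1 y2 1).filter (fun y => decide (c2 - k ≤ y ∧ y ≤ c2 + k)) := by
    apply List.filter_congr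
    intro y _
    have hiff := sq_le_iff_abs_le m k (y - c2) hk0 hk1 hk2
    simp only [decide_eq_decide]
    omega
  rw [hfc, filter_pyRange_interval]
  have hb : min (y2 - 1) (c2 + k) + 1 = min y2 (c2 + k + 1) := by omega
  rw [hb]

-- ===== VERDICT (by name: the statement is the Claim_ definition above) =====
theorem points_in_circle_spec : Claim_equal_points_in_circle := by
  intro center radius x_bounds y_bounds _
  show points_in_circle center radius x_bounds y_bounds = points_in_circle_alt center radius x_bounds y_bounds
  simp only [points_in_circle, points_in_circle_alt]
  apply PySem.List.foldl_congr_mem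
  intro acc x hx
  rw [PySem.List.foldl_append_ite]
  have hmx := (PySem.List.mem_pyRange_one).1 hx
  have hdx : (x - center.1)*(x - center.1) ≤ radius*radius := by
    have h1 : center.1 - radius ≤ x := le_trans (le_max_right _ _) hmx.1
    have h2 : x < center.1 + radius := lt_of_lt_of_le hmx.2 (min_le_right _ _)
    nlinarith [mul_nonneg (by omega : (0:Int) ≤ radius - (x - center.1)) (by omega : (0:Int) ≤ radius + (x - center.1))]
  have := column_eq center.1 center.2 radius
      (max y_bounds.1 (center.2 - radius)) (min y_bounds.2 (center.2 + radius)) x hdx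
  rw [this]
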